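-- pv_equiv track=rewrite | github.com/sopolat/stateful_virtualization | publication_deneme.py | dataParse
-- ===== SOURCE A (Python) =====
-- def dataParse(traces):
--     reqs=traces["requests"]
--     ress=traces["responses"]
--     reqs2=[]
--     ress2=[]
--
--     for req,res in zip(reqs, ress):
--         req2=[]
--         res2=[]
--         count =0
--         for a,b in zip(req,res):
--             if(a == "QX"):
--                 count+=1
--             if(count == 2):
--                 break
--             req2.append(a)
--             res2.append(b)
--         reqs2.append(req2)
--         ress2.append(res2)
--     return reqs2,ress2
-- ===== SOURCE B (Python) =====
-- def _second_qx(xs):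
--     # index of the second "QX" in xs, or len(xs) if there are fewer than two
--     seen = False
--     for i, x in enumerate(xs):
--         if x == "QX":
--             if seen:
--                 return i
--             seen = True
--     return len(xs)
--
-- def dataParse(traces):
--     reqs = traces["requests"]
--     ress = traces["responses"]
--     pairs = []
--     for req, res in zip(reqs, ress):
--         n = min(len(req), len(res))
--         cutoff = _second_qx(req[:n])
--         pairs.append((req[:cutoff], res[:cutoff]))
--     reqs2 = [p[0] for p in pairs]
--     ress2 = [p[1] for p in pairs]
--     return reqs2, ress2
-- ===== Notes on version B (the rewrite author's own statement) =====
-- stated objective: simpler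
-- what changed: Replaces the incremental append-with-counter inner loop by find-the-second-'QX'-boundary-then-slice: compute the cutoff index in the min-length prefix and take slices, instead of copying element by element under a counter.
import Mathlib
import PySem

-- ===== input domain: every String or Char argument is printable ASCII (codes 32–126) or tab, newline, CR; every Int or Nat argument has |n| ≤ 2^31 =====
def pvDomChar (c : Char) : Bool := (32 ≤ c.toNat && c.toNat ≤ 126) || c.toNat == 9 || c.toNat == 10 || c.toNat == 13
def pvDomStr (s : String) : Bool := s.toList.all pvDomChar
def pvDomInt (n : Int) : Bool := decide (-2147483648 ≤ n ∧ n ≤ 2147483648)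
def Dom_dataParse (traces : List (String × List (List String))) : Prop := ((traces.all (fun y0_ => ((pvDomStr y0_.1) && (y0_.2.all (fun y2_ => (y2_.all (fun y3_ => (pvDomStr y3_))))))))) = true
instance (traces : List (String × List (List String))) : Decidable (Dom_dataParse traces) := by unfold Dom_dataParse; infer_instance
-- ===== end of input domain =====

-- B replaces A's append-under-a-counter inner loop by "find the index of the second 'QX'
-- in the min-length prefix, then slice both sequences there" (objective: simpler).

-- ===== PORT A =====
-- inner 'for a,b in zip(req,res)' loop of A: build req2/res2 element by element,
-- counting "QX"s and breaking when the count reaches 2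
def pvInnerA : List (String × String) → Int → List String × List String
  | [], _ => ([], [])
  | (a, b) :: rest, count =>
    let count' := if a == "QX" then count + 1 else count
    if count' == 2 then ([], [])
    else
      let (r2, s2) := pvInnerA rest count'
      (a :: r2, b :: s2)

-- outer 'for req,res in zip(reqs,ress)' loop of A
def pvOuterA : List (List String × List String) → List (List String) × List (List String)
  | [] => ([], [])
  | (req, res) :: rest =>
    let (req2, res2) := pvInnerA (req.zip res) 0
    let (rs, ss) := pvOuterA rest
    (req2 :: rs, res2 :: ss)

def dataParse (traces : List (String × List (List String))) : List (List String) × List (List String) :=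
  match traces.lookup "requests", traces.lookup "responses" with
  | some reqs, some ress => pvOuterA (reqs.zip ress)
  | _, _ => ([], [])  -- KeyError in Python; excluded by Pre_dataParse

-- ===== PORT B =====
-- _second_qx: index of the second "QX" in xs, or len(xs) if fewer than two occur
def pvSecondQx : List String → Bool → Nat
  | [], _ => 0
  | x :: rest, seen =>
    if x == "QX" then
      if seen then 0 else 1 + pvSecondQx rest true
    else 1 + pvSecondQx rest seen

-- per-pair: cutoff in the min-length prefix, then slice both sides
def pvCutPair (p : List String × List String) : List String × List String :=
  let n := min p.1.length p.2.length
  let cutoff := pvSecondQx (p.1.take n) false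
  (p.1.take cutoff, p.2.take cutoff)

def dataParse_alt (traces : List (String × List (List String))) : List (List String) × List (List String) :=
  match traces.lookup "requests" with
  | none => ([], [])  -- KeyError in Python; excluded by Pre_dataParse
  | some reqs =>
    match traces.lookup "responses" with
    | none => ([], [])  -- KeyError in Python; excluded by Pre_dataParse
    | some ress => ((reqs.zip ress).map pvCutPair).unzip

-- ===== PRECONDITION & SPEC =====
-- Pre_ excludes exactly the inputs where Python A raises KeyError: a missing
-- "requests" or "responses" key.
def Pre_dataParse (traces : List (String × List (List String))) : Prop :=
  (traces.lookup "requests").isSome = true ∧ (traces.lookup "responses").isSome = true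
instance (traces : List (String × List (List String))) : Decidable (Pre_dataParse traces) := by unfold Pre_dataParse; infer_instance

def pvWitness_dataParse : (List (String × List (List String))) :=
  [("requests", [["a", "QX", "b", "QX", "c"]]), ("responses", [["1", "2", "3", "4"]])]

def Spec_dataParse (traces : List (String × List (List String))) (out : List (List String) × List (List String)) : Prop := out = dataParse_alt traces
instance (traces : List (String × List (List String))) (out : List (List String) × List (List String)) : Decidable (Spec_dataParse traces out) := by unfold Spec_dataParse; infer_instance

-- ===== CLAIM (what is proved, stated in full; the proofs are below) =====
def Claim_equal_dataParse : Prop := ∀ (traces : List (String × List (List String))), Dom_dataParse traces → Pre_dataParse traces → Spec_dataParse traces (dataParse traces)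

-- ===== LEMMAS AND PROOFS =====

theorem pvSecondQx_le_length (xs : List String) (seen : Bool) :
    pvSecondQx xs seen ≤ xs.length := by
  induction xs generalizing seen with
  | nil => simp [pvSecondQx]
  | cons x rest ih =>
    have h1 := ih true
    have h2 := ih seen
    simp only [pvSecondQx, List.length_cons]
    split_ifs <;> omega

theorem pvTakeOneAdd {α : Type} (k : Nat) (a : α) (xs : List α) :
    List.take (1 + k) (a :: xs) = a :: xs.take k := by
  rw [Nat.add_comm, List.take_succ_cons]

theorem pvInnerA_eq (l : List (String × String)) (seen : Bool) :
    pvInnerA l (if seen then 1 else 0) =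
      ((l.map Prod.fst).take (pvSecondQx (l.map Prod.fst) seen),
       (l.map Prod.snd).take (pvSecondQx (l.map Prod.fst) seen)) := by
  induction l generalizing seen with
  | nil => simp [pvInnerA, pvSecondQx]
  | cons p rest ih =>
    obtain ⟨a, b⟩ := p
    by_cases ha : a = "QX"
    · cases seen with
      | true => simp [pvInnerA, pvSecondQx, ha]
      | false =>
        have h := ih true
        simp only [if_true] at h
        simp [pvInnerA, pvSecondQx, ha, h, pvTakeOneAdd]
    · cases seen with
      | true =>
        have h := ih true
        simp only [if_true] at h
        simp [pvInnerA, pvSecondQx, ha, h, pvTakeOneAdd]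
      | false =>
        have h := ih false
        simp only [Bool.false_eq_true, if_false] at h
        simp [pvInnerA, pvSecondQx, ha, h, pvTakeOneAdd]

theorem pvZipFst (req res : List String) :
    (req.zip res).map Prod.fst = req.take (min req.length res.length) := by
  induction req generalizing res with
  | nil => simp
  | cons a req ih =>
    cases res with
    | nil => simp
    | cons b res => simp [List.zip_cons_cons, ih, Nat.succ_min_succ]

theorem pvZipSnd (req res : List String) :
    (req.zip res).map Prod.snd = res.take (min req.length res.length) := by
  induction req generalizing res with
  | nil => simp
  | cons a req ih =>
    cases res with
    | nil => simp
    | cons b res => simp [List.zip_cons_cons, ih, Nat.succ_min_succ]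

theorem pvPair_eq (req res : List String) :
    pvInnerA (req.zip res) 0 = pvCutPair (req, res) := by
  have h := pvInnerA_eq (req.zip res) false
  simp only [Bool.false_eq_true, if_false] at h
  rw [pvZipFst, pvZipSnd] at h
  have hc : pvSecondQx (req.take (min req.length res.length)) false ≤ min req.length res.length := by
    have := pvSecondQx_le_length (req.take (min req.length res.length)) false
    simp at this
    omega
  unfold pvCutPair
  simp only
  rw [h, List.take_take, List.take_take, Nat.min_eq_left hc]

theorem pvOuter_eq (pairs : List (List String × List String)) :
    pvOuterA pairs = (pairs.map pvCutPair).unzip := by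
  induction pairs with
  | nil => simp [pvOuterA]
  | cons p rest ih =>
    obtain ⟨req, res⟩ := p
    simp only [pvOuterA, List.map_cons, List.unzip_cons, ih, pvPair_eq]

-- ===== VERDICT (by name: the statement is the Claim_ definition above) =====
theorem dataParse_spec : Claim_equal_dataParse := by
  intro traces _ hpre
  unfold Spec_dataParse dataParse dataParse_alt
  obtain ⟨h1, h2⟩ := hpre
  cases hr : traces.lookup "requests" with
  | none => simp [hr] at h1
  | some reqs =>
    cases hs : traces.lookup "responses" with
    | none => simp [hs] at h2
    | some ress => simp [pvOuter_eq]
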